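-- pv_equiv track=rewrite | github.com/toshimatagi/card-grader | backend/services/surface.py | _overall_severity
-- ===== SOURCE A (Python) =====
-- def _overall_severity(defects: list) -> str:
--     """全体の深刻度"""
--     if not defects:
--         return "none"
--     severities = [d["severity"] for d in defects]
--     if "critical" in severities:
--         return "critical"
--     elif "major" in severities:
--         return "major"
--     return "minor"
-- ===== SOURCE B (Python) =====
-- _RANK = {"critical": 2, "major": 1}
-- _LABEL = {2: "critical", 1: "major", 0: "minor"}
--
-- def _overall_severity(defects: list) -> str:
--     """全体の深刻度"""
--     if not defects:
--         return "none"
--     best = 0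
--     for d in defects:
--         best = max(best, _RANK.get(d["severity"], 0))
--     return _LABEL[best]
-- ===== Notes on version B (the rewrite author's own statement) =====
-- stated objective: alternative
-- what changed: Replaces the build-a-list-then-three-membership-scans cascade by a single fold that keeps the maximal severity rank (critical=2, major=1, other=0) and maps the final rank to its label; Pre_ excludes defects lacking a 'severity' key, where both A and B raise KeyError.
import Mathlib
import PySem

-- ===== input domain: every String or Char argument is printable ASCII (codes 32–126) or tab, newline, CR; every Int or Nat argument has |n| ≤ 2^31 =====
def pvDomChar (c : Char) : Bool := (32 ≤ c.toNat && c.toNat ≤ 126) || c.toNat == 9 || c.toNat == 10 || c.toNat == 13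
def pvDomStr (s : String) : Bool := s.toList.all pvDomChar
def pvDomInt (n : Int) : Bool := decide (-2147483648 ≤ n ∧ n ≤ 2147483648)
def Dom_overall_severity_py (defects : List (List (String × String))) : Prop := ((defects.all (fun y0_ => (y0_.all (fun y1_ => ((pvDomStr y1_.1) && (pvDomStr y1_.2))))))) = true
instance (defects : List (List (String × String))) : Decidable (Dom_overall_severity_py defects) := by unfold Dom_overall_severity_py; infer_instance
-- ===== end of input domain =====

-- B replaces the three membership scans over a severities list by one fold keeping the
-- maximal severity rank, then maps the rank to its label (alternative decomposition).
-- ===== PORT A =====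
-- d["severity"] raises KeyError when absent; Pre_ guarantees presence, so getD "" is exact on Pre_.
def overall_severity_py (defects : List (List (String × String))) : String :=
  if defects = [] then "none"
  else
    let severities := defects.map (fun d => (d.lookup "severity").getD "")
    if "critical" ∈ severities then "critical"
    else if "major" ∈ severities then "major"
    else "minor"

-- ===== PORT B =====
def pvRank (s : String) : Int :=
  if s = "critical" then 2 else if s = "major" then 1 else 0

def pvLabel (b : Int) : String :=
  if b = 2 then "critical" else if b = 1 then "major" else "minor"

def overall_severity_py_alt (defects : List (List (String × String))) : String :=
  if defects = [] then "none"
  else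
    pvLabel (defects.foldl (fun best d => max best (pvRank ((d.lookup "severity").getD ""))) 0)

-- ===== PRECONDITION & SPEC =====
-- Pre_ excludes defects lacking a "severity" key, where both Pythons raise KeyError.
def Pre_overall_severity_py (defects : List (List (String × String))) : Prop :=
  ∀ d ∈ defects, ("severity" ∈ d.map Prod.fst)
instance (defects : List (List (String × String))) : Decidable (Pre_overall_severity_py defects) := by unfold Pre_overall_severity_py; infer_instance

def pvWitness_overall_severity_py : (List (List (String × String))) :=
  [[("severity", "major")], [("severity", "minor")]]

def Spec_overall_severity_py (defects : List (List (String × String))) (out : String) : Prop := out = overall_severity_py_alt defects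
instance (defects : List (List (String × String))) (out : String) : Decidable (Spec_overall_severity_py defects out) := by unfold Spec_overall_severity_py; infer_instance

-- ===== CLAIM (what is proved, stated in full; the proofs are below) =====
def Claim_equal_overall_severity_py : Prop := ∀ (defects : List (List (String × String))), Dom_overall_severity_py defects → Pre_overall_severity_py defects → Spec_overall_severity_py defects (overall_severity_py defects)

-- ===== LEMMAS AND PROOFS =====

def pvBestOf (l : List String) : Int := l.foldl (fun best s => max best (pvRank s)) 0

theorem pvRank_bounds (s : String) : 0 ≤ pvRank s ∧ pvRank s ≤ 2 := by
  unfold pvRank; split_ifs <;> omega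

theorem pvBestOf_gen (l : List String) (a : Int) (ha : 0 ≤ a) :
    l.foldl (fun best s => max best (pvRank s)) a = max a (pvBestOf l) := by
  induction l generalizing a with
  | nil => simp [pvBestOf]; omega
  | cons s t ih =>
    have h0 := pvRank_bounds s
    simp only [pvBestOf, List.foldl_cons] at *
    rw [ih _ (by omega), ih (max 0 (pvRank s)) (by omega)]
    omega

theorem pvBestOf_cons (s : String) (l : List String) :
    pvBestOf (s :: l) = max (pvRank s) (pvBestOf l) := by
  have h0 := pvRank_bounds s
  unfold pvBestOf
  rw [List.foldl_cons, pvBestOf_gen _ _ (by omega)]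
  unfold pvBestOf
  omega

theorem pvBestOf_bounds (l : List String) : 0 ≤ pvBestOf l ∧ pvBestOf l ≤ 2 := by
  induction l with
  | nil => simp [pvBestOf]
  | cons s t ih =>
    rw [pvBestOf_cons]
    have := pvRank_bounds s
    omega

theorem pvBestOf_eq_two (l : List String) : pvBestOf l = 2 ↔ "critical" ∈ l := by
  induction l with
  | nil => simp [pvBestOf]
  | cons s t ih =>
    rw [pvBestOf_cons, List.mem_cons, ← ih]
    have hb := pvBestOf_bounds t
    by_cases hs : "critical" = s
    · subst hs
      simp only [show pvRank "critical" = 2 from rfl]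
      exact ⟨fun _ => Or.inl trivial, fun _ => by omega⟩
    · have hr : pvRank s ≤ 1 := by
        unfold pvRank; split_ifs with h1 <;> simp_all
      have hr0 : 0 ≤ pvRank s := (pvRank_bounds s).1
      simp only [hs, false_or]
      omega

theorem pvBestOf_ge_one (l : List String) :
    1 ≤ pvBestOf l ↔ ("critical" ∈ l ∨ "major" ∈ l) := by
  induction l with
  | nil => simp [pvBestOf]
  | cons s t ih =>
    rw [pvBestOf_cons, List.mem_cons, List.mem_cons]
    have hb := pvBestOf_bounds t
    by_cases hc : "critical" = s
    · subst hc
      simp only [show pvRank "critical" = 2 from rfl]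
      exact ⟨fun _ => Or.inl (Or.inl trivial), fun _ => by omega⟩
    · by_cases hm : "major" = s
      · subst hm
        simp only [show pvRank "major" = 1 from rfl]
        exact ⟨fun _ => Or.inr (Or.inl trivial), fun _ => by omega⟩
      · have hr : pvRank s = 0 := by
          unfold pvRank; split_ifs with h1 h2 <;> simp_all
        simp only [hc, hm, false_or, hr, ← ih]
        omega

theorem pvLabel_bestOf (l : List String) :
    pvLabel (pvBestOf l) =
      (if "critical" ∈ l then "critical"
       else if "major" ∈ l then "major" else "minor") := by
  have hb := pvBestOf_bounds l
  have h2 := pvBestOf_eq_two l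
  have h1 := pvBestOf_ge_one l
  by_cases hc : "critical" ∈ l
  · rw [if_pos hc]; simp [pvLabel, h2.mpr hc]
  · rw [if_neg hc]
    by_cases hm : "major" ∈ l
    · rw [if_pos hm]
      have hv : pvBestOf l = 1 := by
        have := h1.mpr (Or.inr hm)
        have hne2 : pvBestOf l ≠ 2 := fun h => hc (h2.mp h)
        omega
      simp [pvLabel, hv]
    · rw [if_neg hm]
      have hv : pvBestOf l = 0 := by
        have hne2 : pvBestOf l ≠ 2 := fun h => hc (h2.mp h)
        have hlt : ¬ (1 ≤ pvBestOf l) := fun h => by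
          rcases h1.mp h with h' | h' <;> simp_all
        omega
      simp [pvLabel, hv]

-- ===== VERDICT (by name: the statement is the Claim_ definition above) =====
theorem overall_severity_py_spec : Claim_equal_overall_severity_py := by
  intro defects _ _
  unfold Spec_overall_severity_py overall_severity_py overall_severity_py_alt
  by_cases h : defects = []
  · simp [h]
  · simp only [h, if_false]
    have : defects.foldl (fun best d => max best (pvRank ((d.lookup "severity").getD ""))) 0
        = pvBestOf (defects.map (fun d => (d.lookup "severity").getD "")) := by
      unfold pvBestOf
      rw [List.foldl_map]
    rw [this, pvLabel_bestOf]
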